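-- pv_equiv track=rewrite | github.com/pointlander/chatbot-transformer | generate.py | parse
-- ===== SOURCE A (Python) =====
-- def parse(value):
--     token = ''
--     quote = False
--     tokens = []
--     for symbol in value:
--         if quote:
--             if symbol == '"':
--                 quote = False
--                 token = token + symbol
--                 tokens.append(token)
--                 token = ''
--             elif symbol == "'":
--                 quote = False
--                 token = token + symbol
--                 tokens.append(token)
--                 token = ''
--             elif symbol == '`':
--                 quote = False
--                 token = token + symbol
--                 tokens.append(token)
--                 token = ''
--             else:
--                 token = token + symbol
--         else:
--             if symbol == '"':
--                 if len(token) > 0 :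
--                     tokens.append(token)
--                 quote = True
--                 token = ''
--                 token = token + symbol
--             elif symbol == "'":
--                 if len(token) > 0 :
--                     tokens.append(token)
--                 quote = True
--                 token = ''
--                 token = token + symbol
--             elif symbol == '`':
--                 if len(token) > 0 :
--                     tokens.append(token)
--                 quote = True
--                 token = ''
--                 token = token + symbol
--             elif symbol == ' ' or symbol == '\t' or symbol == '\r' or symbol == '\n':
--                 if len(token) > 0 :
--                     tokens.append(token)
--                     token = ''
--             elif symbol in ['|', '=', '>', '<', '+', '-', '*', '/', '(', ')', '[', ']']:
--                 if len(token) > 0 :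
--                     tokens.append(token)
--                 tokens.append(symbol)
--                 token = ''
--             else:
--                 token = token + symbol
--     return tokens
-- ===== SOURCE B (Python) =====
-- QUOTES = {'"', "'", '`'}
-- WHITESPACE = {' ', '\t', '\r', '\n'}
-- OPERATORS = {'|', '=', '>', '<', '+', '-', '*', '/', '(', ')', '[', ']'}
--
--
-- def parse(value):
--     tokens = []
--     token = []  # list of chars of the pending token
--     i = 0
--     n = len(value)
--     while i < n:
--         c = value[i]
--         if c in QUOTES:
--             if token:
--                 tokens.append(''.join(token))
--                 token = []
--             j = i + 1
--             while j < n and value[j] not in QUOTES: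
--                 j += 1
--             if j == n:
--                 return tokens  # unterminated quote: quoted text is dropped
--             tokens.append(value[i:j + 1])
--             i = j + 1
--         elif c in WHITESPACE:
--             if token:
--                 tokens.append(''.join(token))
--                 token = []
--             i += 1
--         elif c in OPERATORS:
--             if token:
--                 tokens.append(''.join(token))
--                 token = []
--             tokens.append(c)
--             i += 1
--         else:
--             token.append(c)
--             i += 1
--     return tokens
-- ===== Notes on version B (the rewrite author's own statement) =====
-- stated objective: alternative
-- what changed: Replaced the per-character quote-flag state machine by an index-based scanner that finds the closing quote and emits the whole quoted span as one slice, buffering pending tokens as a char list joined once.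
import Mathlib
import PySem

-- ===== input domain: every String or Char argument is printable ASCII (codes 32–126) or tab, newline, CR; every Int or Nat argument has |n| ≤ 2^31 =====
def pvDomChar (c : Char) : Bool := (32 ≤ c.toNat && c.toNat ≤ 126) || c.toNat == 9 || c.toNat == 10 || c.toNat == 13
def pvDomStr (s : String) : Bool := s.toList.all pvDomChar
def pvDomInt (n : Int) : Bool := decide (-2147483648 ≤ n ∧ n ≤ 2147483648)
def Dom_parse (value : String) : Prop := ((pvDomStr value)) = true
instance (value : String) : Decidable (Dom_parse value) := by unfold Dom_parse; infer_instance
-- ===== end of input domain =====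

-- B replaces A's per-character quote-flag state machine by an index/scan-ahead tokenizer (alternative decomposition, same cost).

-- ===== PORT A =====
-- state is (token, quote, tokens); one step of A's for-loop body
def parseStep (st : List Char × Bool × List String) (symbol : Char) : List Char × Bool × List String :=
  if st.2.1 then
    if symbol = '"' then ([], false, st.2.2 ++ [String.mk (st.1 ++ [symbol])])
    else if symbol = '\'' then ([], false, st.2.2 ++ [String.mk (st.1 ++ [symbol])])
    else if symbol = '`' then ([], false, st.2.2 ++ [String.mk (st.1 ++ [symbol])])
    else (st.1 ++ [symbol], st.2.1, st.2.2)
  else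
    if symbol = '"' then ([symbol], true, if st.1.length > 0 then st.2.2 ++ [String.mk st.1] else st.2.2)
    else if symbol = '\'' then ([symbol], true, if st.1.length > 0 then st.2.2 ++ [String.mk st.1] else st.2.2)
    else if symbol = '`' then ([symbol], true, if st.1.length > 0 then st.2.2 ++ [String.mk st.1] else st.2.2)
    else if symbol = ' ' ∨ symbol = '\t' ∨ symbol = '\r' ∨ symbol = '\n' then
      (if st.1.length > 0 then [] else st.1, false, if st.1.length > 0 then st.2.2 ++ [String.mk st.1] else st.2.2)
    else if symbol ∈ ['|', '=', '>', '<', '+', '-', '*', '/', '(', ')', '[', ']'] then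
      ([], false, (if st.1.length > 0 then st.2.2 ++ [String.mk st.1] else st.2.2) ++ [String.mk [symbol]])
    else (st.1 ++ [symbol], false, st.2.2)

def parse (value : String) : List String :=
  (value.toList.foldl parseStep ([], false, [])).2.2

-- ===== PORT B =====
def isQuoteB (c : Char) : Bool := c ∈ ['"', '\'', '`']
def isWsB (c : Char) : Bool := c ∈ [' ', '\t', '\r', '\n']
def isOpB (c : Char) : Bool := c ∈ ['|', '=', '>', '<', '+', '-', '*', '/', '(', ')', '[', ']']

-- Source B's inner `while j < n and value[j] not in QUOTES` scan: the span up to and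
-- including the closing quote, plus the remainder; none if no closing quote exists
def scanQuote : List Char → Option (List Char × List Char)
  | [] => none
  | c :: cs =>
    if isQuoteB c then some ([c], cs)
    else
      match scanQuote cs with
      | none => none
      | some (sp, rest) => some (c :: sp, rest)

theorem scanQuote_length : ∀ (l sp rest : List Char), scanQuote l = some (sp, rest) → rest.length < l.length := by
  intro l
  induction l with
  | nil => intro sp rest h; simp [scanQuote] at h
  | cons c cs ih =>
    intro sp rest h
    simp only [scanQuote] at h
    split at h
    · simp at h
      rw [← h.2]
      simp
    · split at h
      · exact absurd h (by simp)
      · next sp' rest' heq =>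
        simp at h
        have := ih sp' rest' heq
        rw [← h.2]
        simp
        omega

def parseAltGo : List Char → List Char → List String → List String
  | [], _, tokens => tokens
  | c :: cs, token, tokens =>
    if isQuoteB c then
      let tokens' := if token.length > 0 then tokens ++ [String.mk token] else tokens
      match h : scanQuote cs with
      | none => tokens'
      | some (sp, rest) => parseAltGo rest [] (tokens' ++ [String.mk (c :: sp)])
    else if isWsB c then
      parseAltGo cs [] (if token.length > 0 then tokens ++ [String.mk token] else tokens)
    else if isOpB c then
      parseAltGo cs [] ((if token.length > 0 then tokens ++ [String.mk token] else tokens) ++ [String.mk [c]])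
    else parseAltGo cs (token ++ [c]) tokens
termination_by l _ _ => l.length
decreasing_by
  · have := scanQuote_length _ _ _ h; simp; omega
  · simp
  · simp
  · simp

def parse_alt (value : String) : List String := parseAltGo value.toList [] []

-- ===== PRECONDITION & SPEC =====
def Spec_parse (value : String) (out : List String) : Prop := out = parse_alt value
instance (value : String) (out : List String) : Decidable (Spec_parse value out) := by unfold Spec_parse; infer_instance

-- ===== CLAIM (what is proved, stated in full; the proofs are below) =====
def Claim_equal_parse : Prop := ∀ (value : String), Dom_parse value → Spec_parse value (parse value)

-- ===== LEMMAS AND PROOFS =====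

-- while in quote mode, A's fold accumulates exactly the span scanQuote finds
theorem quoteRun : ∀ (l token : List Char) (tokens : List String),
    (l.foldl parseStep (token, true, tokens)).2.2 =
      match scanQuote l with
      | none => tokens
      | some (sp, rest) => (rest.foldl parseStep ([], false, tokens ++ [String.mk (token ++ sp)])).2.2 := by
  intro l
  induction l with
  | nil => intro token tokens; simp [scanQuote]
  | cons c cs ih =>
    intro token tokens
    by_cases hq : isQuoteB c
    · have h3 : c = '"' ∨ c = '\'' ∨ c = '`' := by
        simp [isQuoteB] at hq; tauto
      simp only [List.foldl, scanQuote, hq, if_pos]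
      rcases h3 with h | h | h <;> simp [parseStep, h]
    · have h3 : ¬ (c = '"') ∧ ¬ (c = '\'') ∧ ¬ (c = '`') := by
        simp [isQuoteB] at hq; tauto
      simp only [List.foldl, scanQuote, hq, if_neg, Bool.false_eq_true, not_false_iff]
      have hstep : parseStep (token, true, tokens) c = (token ++ [c], true, tokens) := by
        simp [parseStep, h3.1, h3.2.1, h3.2.2]
      rw [hstep, ih]
      cases hsc : scanQuote cs with
      | none => simp
      | some p =>
        obtain ⟨sp, rest⟩ := p
        simp [List.append_assoc]

theorem mainLemma : ∀ (n : Nat) (l : List Char), l.length ≤ n → ∀ (token : List Char) (tokens : List String),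
    (l.foldl parseStep (token, false, tokens)).2.2 = parseAltGo l token tokens := by
  intro n
  induction n with
  | zero =>
    intro l hl token tokens
    have : l = [] := by cases l <;> simp_all
    subst this; simp [parseAltGo]
  | succ n ih =>
    intro l hl token tokens
    cases l with
    | nil => simp [parseAltGo]
    | cons c cs =>
      simp only [List.length_cons] at hl
      by_cases hq : isQuoteB c
      · have h3 : c = '"' ∨ c = '\'' ∨ c = '`' := by
          simp [isQuoteB] at hq; tauto
      -- A opens quote mode; quoteRun converts the rest of the fold
        have hstep : parseStep (token, false, tokens) c =
            ([c], true, if token.length > 0 then tokens ++ [String.mk token] else tokens) := by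
          rcases h3 with h | h | h <;> simp [parseStep, h]
        simp only [List.foldl, hstep]
        rw [quoteRun]
        simp only [parseAltGo, hq, if_pos]
        cases hsc : scanQuote cs with
        | none => simp
        | some p =>
          obtain ⟨sp, rest⟩ := p
          have hr := scanQuote_length _ _ _ hsc
          simp only []
          rw [ih rest (by omega)]
          simp
      · have h3 : ¬ (c = '"') ∧ ¬ (c = '\'') ∧ ¬ (c = '`') := by
          simp [isQuoteB] at hq; tauto
        by_cases hw : isWsB c
        · have hw' : c = ' ' ∨ c = '\t' ∨ c = '\r' ∨ c = '\n' := by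
            simp [isWsB] at hw; tauto
          have hstep : parseStep (token, false, tokens) c =
              (if token.length > 0 then [] else token, false,
               if token.length > 0 then tokens ++ [String.mk token] else tokens) := by
            simp [parseStep, h3.1, h3.2.1, h3.2.2, hw']
          simp only [List.foldl, hstep, parseAltGo, hq, hw, Bool.false_eq_true, if_neg, if_pos,
            not_false_iff]
          by_cases ht : token.length > 0
          · simp only [ht, if_pos]
            exact ih cs (by omega) [] _
          · have : token = [] := by cases token <;> simp_all
            subst this
            simp only [ht, if_neg]
            exact ih cs (by omega) [] _
        · by_cases ho : isOpB c
          · have ho' : c ∈ ['|', '=', '>', '<', '+', '-', '*', '/', '(', ')', '[', ']'] := by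
              simpa [isOpB] using ho
            have hw' : ¬ (c = ' ' ∨ c = '\t' ∨ c = '\r' ∨ c = '\n') := by
              simp [isWsB] at hw; tauto
            have hstep : parseStep (token, false, tokens) c =
                ([], false, (if token.length > 0 then tokens ++ [String.mk token] else tokens) ++ [String.mk [c]]) := by
              simp [parseStep, h3.1, h3.2.1, h3.2.2, hw', ho']
            simp only [List.foldl, hstep, parseAltGo, hq, hw, ho, Bool.false_eq_true, if_neg,
              if_pos, not_false_iff]
            exact ih cs (by omega) [] _
          · have hw' : ¬ (c = ' ' ∨ c = '\t' ∨ c = '\r' ∨ c = '\n') := by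
              simp [isWsB] at hw; tauto
            have ho' : c ∉ (['|', '=', '>', '<', '+', '-', '*', '/', '(', ')', '[', ']'] : List Char) := by
              simpa [isOpB] using ho
            have hstep : parseStep (token, false, tokens) c = (token ++ [c], false, tokens) := by
              simp [parseStep, h3.1, h3.2.1, h3.2.2, hw', ho']
            simp only [List.foldl, hstep, parseAltGo, hq, hw, ho, Bool.false_eq_true, if_neg,
              not_false_iff]
            exact ih cs (by omega) _ _

-- ===== VERDICT (by name: the statement is the Claim_ definition above) =====
theorem parse_spec : Claim_equal_parse := by
  intro value _
  unfold Spec_parse parse parse_alt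
  exact mainLemma value.toList.length value.toList (le_refl _) [] []
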